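-- pv_equiv track=rewrite | github.com/YangLiyli131/Leetcode2020 | in_Python/1395 Count Number of Teams.py | numTeams
-- ===== SOURCE A (Python) =====
-- def numTeams(rating):
--     """
--     :type rating: List[int]
--     :rtype: int
--     """
--     res = 0
--     l = len(rating)
--     for i in range(l):
--         for j in range(i+1, l):
--             for k in range(j+1, l):
--                 if rating[i] < rating[j] < rating[k] or rating[i] > rating[j] > rating[k]:
--                     res += 1
--     return res
-- ===== SOURCE B (Python) =====
-- def numTeams(rating):
--     """
--     :type rating: List[int]
--     :rtype: int
--     """
--     n = len(rating)
--     res = 0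
--     for j in range(n):
--         x = rating[j]
--         left = rating[:j]
--         right = rating[j+1:]
--         ll = sum(1 for v in left if v < x)
--         lg = sum(1 for v in left if v > x)
--         rl = sum(1 for v in right if v < x)
--         rg = sum(1 for v in right if v > x)
--         res += ll * rg + lg * rl
--     return res
-- ===== Notes on version B (the rewrite author's own statement) =====
-- stated objective: faster
-- what changed: Replaces the O(n^3) enumeration of all index triples by an O(n^2) pass that, for each middle index j, counts smaller/greater elements on each side and multiplies the counts.
import Mathlib
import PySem

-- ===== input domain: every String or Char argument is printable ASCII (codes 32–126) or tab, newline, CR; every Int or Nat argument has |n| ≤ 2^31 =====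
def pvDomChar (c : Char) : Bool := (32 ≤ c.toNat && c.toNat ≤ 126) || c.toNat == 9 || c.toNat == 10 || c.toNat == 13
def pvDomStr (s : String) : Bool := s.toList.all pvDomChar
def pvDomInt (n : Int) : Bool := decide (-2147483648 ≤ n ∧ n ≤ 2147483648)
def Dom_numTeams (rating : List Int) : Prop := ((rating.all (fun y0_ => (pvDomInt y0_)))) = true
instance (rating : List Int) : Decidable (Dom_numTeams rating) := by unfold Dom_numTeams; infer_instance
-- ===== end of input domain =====

-- B replaces A's O(n^3) triple enumeration by an O(n^2) middle-index pass (count smaller/greater on each side, multiply); objective: faster (asymptotic).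

-- ===== PORT A =====
def numTeams (rating : List Int) : Int :=
  let l : Int := PySem.List.len rating
  (PySem.List.pyRange 0 l 1).foldl (fun res i =>
    (PySem.List.pyRange (i + 1) l 1).foldl (fun res j =>
      (PySem.List.pyRange (j + 1) l 1).foldl (fun res k =>
        if (PySem.List.pyGetD rating i 0 < PySem.List.pyGetD rating j 0 ∧
            PySem.List.pyGetD rating j 0 < PySem.List.pyGetD rating k 0) ∨
           (PySem.List.pyGetD rating j 0 < PySem.List.pyGetD rating i 0 ∧
            PySem.List.pyGetD rating k 0 < PySem.List.pyGetD rating j 0)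
        then res + 1 else res) res) res) 0

-- ===== PORT B =====
def numTeams_alt (rating : List Int) : Int :=
  let n : Int := PySem.List.len rating
  (PySem.List.pyRange 0 n 1).foldl (fun res j =>
    let x := PySem.List.pyGetD rating j 0
    let left := PySem.List.slice rating none (some j)
    let right := PySem.List.slice rating (some (j + 1)) none
    let ll : Int := (left.countP (fun v => decide (v < x)) : Int)
    let lg : Int := (left.countP (fun v => decide (x < v)) : Int)
    let rl : Int := (right.countP (fun v => decide (v < x)) : Int)
    let rg : Int := (right.countP (fun v => decide (x < v)) : Int)
    res + (ll * rg + lg * rl)) 0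

-- ===== PRECONDITION & SPEC =====
def Spec_numTeams (rating : List Int) (out : Int) : Prop := out = numTeams_alt rating
instance (rating : List Int) (out : Int) : Decidable (Spec_numTeams rating out) := by unfold Spec_numTeams; infer_instance

-- ===== CLAIM (what is proved, stated in full; the proofs are below) =====
def Claim_equal_numTeams : Prop := ∀ (rating : List Int), Dom_numTeams rating → Spec_numTeams rating (numTeams rating)

-- ===== LEMMAS AND PROOFS =====

-- indicator of r a < r b
def pvU (rating : List Int) (a b : Nat) : Int := if rating.getD a 0 < rating.getD b 0 then 1 else 0

-- a map-sum over range(a, b) is a Finset.Ico sum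
theorem pv_sum_map_pyRange (a b : Nat) (g : Int → Int) :
    ((PySem.List.pyRange (a : Int) (b : Int) 1).map g).sum = ∑ m ∈ Finset.Ico a b, g (m : Int) := by
  rw [PySem.List.pyRange_one]
  have h : ((b : Int) - (a : Int)).toNat = b - a := by omega
  rw [h, List.map_map]
  rw [show ((List.range (b - a)).map (g ∘ fun k : ℕ => (a : Int) + (k : Int))).sum
        = ∑ i ∈ Finset.range (b - a), g ((a : Int) + (i : Int)) from rfl]
  rw [Finset.sum_Ico_eq_sum_range]
  exact Finset.sum_congr rfl fun i hi => by push_cast; ring_nf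

-- counting loop = init + 0/1 map-sum
theorem pv_foldl_ite1 (xs : List Int) (P : Int → Prop) [DecidablePred P] (res : Int) :
    xs.foldl (fun r k => if P k then r + 1 else r) res
      = res + (xs.map (fun k => if P k then (1 : Int) else 0)).sum := by
  have h := PySem.List.foldl_congr_mem (l := xs) (init := res)
    (f := fun r k => if P k then r + 1 else r)
    (g := fun r k => r + if P k then (1 : Int) else 0)
    (fun acc x _ => by simp only []; split <;> simp)
  rw [h, PySem.List.foldl_add]


-- triangular double sum, summed by the outer or by the inner index
theorem pv_swap (n : Nat) (g : Nat → Nat → Int) :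
    ∑ i ∈ Finset.range n, ∑ j ∈ Finset.Ico (i + 1) n, g i j
      = ∑ j ∈ Finset.range n, ∑ i ∈ Finset.range j, g i j := by
  rw [Finset.range_eq_Ico, Finset.sum_Ico_Ico_comm']

-- countP as an indexed 0/1 sum
theorem pv_countP_sum (p : Int → Bool) (xs : List Int) :
    ((xs.countP p : Nat) : Int)
      = ∑ i ∈ Finset.range xs.length, (if p (xs.getD i 0) then (1 : Int) else 0) := by
  induction xs with
  | nil => simp
  | cons x t ih =>
      rw [List.countP_cons, List.length_cons, Finset.sum_range_succ']
      push_cast [ih]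
      simp

theorem pv_sum_map_pyRange0 (b : Nat) (g : Int → Int) :
    ((PySem.List.pyRange 0 (b : Int) 1).map g).sum = ∑ m ∈ Finset.range b, g (m : Int) := by
  rw [show (0:Int) = ((0:Nat):Int) by norm_num, pv_sum_map_pyRange, Finset.range_eq_Ico]

theorem pv_A_sum (rating : List Int) :
    numTeams rating
      = ∑ i ∈ Finset.range rating.length, ∑ j ∈ Finset.Ico (i + 1) rating.length,
          ∑ k ∈ Finset.Ico (j + 1) rating.length,
            (if (rating.getD i 0 < rating.getD j 0 ∧ rating.getD j 0 < rating.getD k 0) ∨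
                (rating.getD j 0 < rating.getD i 0 ∧ rating.getD k 0 < rating.getD j 0)
             then (1 : Int) else 0) := by
  simp only [numTeams, PySem.List.len_eq]
  simp only [pv_foldl_ite1, PySem.List.foldl_add, zero_add]
  rw [pv_sum_map_pyRange0]
  refine Finset.sum_congr rfl fun i _ => ?_
  rw [show ((i:Int)+1) = (((i+1:Nat)):Int) by push_cast; ring, pv_sum_map_pyRange]
  refine Finset.sum_congr rfl fun j _ => ?_
  rw [show ((j:Int)+1) = (((j+1:Nat)):Int) by push_cast; ring, pv_sum_map_pyRange]
  refine Finset.sum_congr rfl fun k _ => ?_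
  simp [PySem.List.pyGetD_natCast]

theorem pv_getD_take (xs : List Int) (j i : Nat) (h : i < j) (hn : j ≤ xs.length) :
    (xs.take j).getD i 0 = xs.getD i 0 := by
  have h1 : i < (xs.take j).length := by simp [List.length_take]; omega
  rw [List.getD_eq_getElem _ _ h1, List.getD_eq_getElem _ _ (by omega), List.getElem_take]

theorem pv_getD_drop (xs : List Int) (m i : Nat) (h : m + i < xs.length) :
    (xs.drop m).getD i 0 = xs.getD (m + i) 0 := by
  have h1 : i < (xs.drop m).length := by simp [List.length_drop]; omega
  rw [List.getD_eq_getElem _ _ h1, List.getD_eq_getElem _ _ h, List.getElem_drop]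

theorem pv_B_sum (rating : List Int) :
    numTeams_alt rating
      = ∑ j ∈ Finset.range rating.length,
          ((∑ i ∈ Finset.range j, pvU rating i j) * (∑ k ∈ Finset.Ico (j + 1) rating.length, pvU rating j k)
            + (∑ i ∈ Finset.range j, pvU rating j i) * (∑ k ∈ Finset.Ico (j + 1) rating.length, pvU rating k j)) := by
  simp only [numTeams_alt, PySem.List.len_eq]
  simp only [PySem.List.foldl_add, zero_add]
  rw [pv_sum_map_pyRange0]
  refine Finset.sum_congr rfl fun j hj => ?_
  have hj' : j < rating.length := Finset.mem_range.mp hj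
  rw [PySem.List.slice_to_natCast]
  rw [show ((j:Int)+1) = (((j+1:Nat)):Int) by push_cast; ring, PySem.List.slice_from_natCast]
  rw [pv_countP_sum, pv_countP_sum, pv_countP_sum, pv_countP_sum]
  rw [List.length_take, List.length_drop, Nat.min_eq_left (le_of_lt hj')]
  rw [Finset.sum_Ico_eq_sum_range, Finset.sum_Ico_eq_sum_range]
  refine congrArg₂ HAdd.hAdd (congrArg₂ HMul.hMul ?_ ?_) (congrArg₂ HMul.hMul ?_ ?_)
  · refine Finset.sum_congr rfl fun i hi => ?_
    have hi' := Finset.mem_range.mp hi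
    rw [pv_getD_take _ _ _ hi' hj'.le]
    simp [pvU, PySem.List.pyGetD_natCast]
  · refine Finset.sum_congr rfl fun k hk => ?_
    have hk' := Finset.mem_range.mp hk
    rw [pv_getD_drop _ _ _ (by omega)]
    simp [pvU, PySem.List.pyGetD_natCast]
  · refine Finset.sum_congr rfl fun i hi => ?_
    have hi' := Finset.mem_range.mp hi
    rw [pv_getD_take _ _ _ hi' hj'.le]
    simp [pvU, PySem.List.pyGetD_natCast]
  · refine Finset.sum_congr rfl fun k hk => ?_
    have hk' := Finset.mem_range.mp hk
    rw [pv_getD_drop _ _ _ (by omega)]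
    simp [pvU, PySem.List.pyGetD_natCast]

theorem pv_key (rating : List Int) :
    (∑ i ∈ Finset.range rating.length, ∑ j ∈ Finset.Ico (i + 1) rating.length,
        ∑ k ∈ Finset.Ico (j + 1) rating.length,
          (if (rating.getD i 0 < rating.getD j 0 ∧ rating.getD j 0 < rating.getD k 0) ∨
              (rating.getD j 0 < rating.getD i 0 ∧ rating.getD k 0 < rating.getD j 0)
           then (1 : Int) else 0))
      = ∑ j ∈ Finset.range rating.length,
          ((∑ i ∈ Finset.range j, pvU rating i j) * (∑ k ∈ Finset.Ico (j + 1) rating.length, pvU rating j k)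
            + (∑ i ∈ Finset.range j, pvU rating j i) * (∑ k ∈ Finset.Ico (j + 1) rating.length, pvU rating k j)) := by
  have hpt : ∀ i j k : Nat,
      (if (rating.getD i 0 < rating.getD j 0 ∧ rating.getD j 0 < rating.getD k 0) ∨
          (rating.getD j 0 < rating.getD i 0 ∧ rating.getD k 0 < rating.getD j 0)
       then (1 : Int) else 0)
        = pvU rating i j * pvU rating j k + pvU rating j i * pvU rating k j := by
    intro i j k
    simp only [pvU]
    split_ifs <;> omega
  have h1 : (∑ i ∈ Finset.range rating.length, ∑ j ∈ Finset.Ico (i + 1) rating.length,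
        ∑ k ∈ Finset.Ico (j + 1) rating.length,
          (if (rating.getD i 0 < rating.getD j 0 ∧ rating.getD j 0 < rating.getD k 0) ∨
              (rating.getD j 0 < rating.getD i 0 ∧ rating.getD k 0 < rating.getD j 0)
           then (1 : Int) else 0))
      = ∑ i ∈ Finset.range rating.length, ∑ j ∈ Finset.Ico (i + 1) rating.length,
          (pvU rating i j * (∑ k ∈ Finset.Ico (j + 1) rating.length, pvU rating j k)
            + pvU rating j i * (∑ k ∈ Finset.Ico (j + 1) rating.length, pvU rating k j)) := by
    refine Finset.sum_congr rfl fun i _ => Finset.sum_congr rfl fun j _ => ?_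
    rw [Finset.sum_congr rfl fun k _ => hpt i j k]
    rw [Finset.sum_add_distrib, ← Finset.mul_sum, ← Finset.mul_sum]
  rw [h1, pv_swap]
  refine Finset.sum_congr rfl fun j _ => ?_
  rw [Finset.sum_add_distrib, ← Finset.sum_mul, ← Finset.sum_mul]

-- ===== VERDICT (by name: the statement is the Claim_ definition above) =====
theorem numTeams_spec : Claim_equal_numTeams := by
  intro rating _
  unfold Spec_numTeams
  rw [pv_A_sum, pv_B_sum, pv_key]
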